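-- pv_equiv track=rewrite | github.com/nishu2613/Klebsiellae_pneumoniae | codes/extract_mutations_06.py | get_substitution_type
-- ===== SOURCE A (Python) =====
-- def get_substitution_type(original, mutated):
--     conservative_groups = [
--         {'A', 'V', 'L', 'I', 'M'},              # Aliphatic
--         {'F', 'Y', 'W'},                        # Aromatic
--         {'D', 'E'},                             # Acidic
--         {'K', 'R', 'H'},                        # Basic
--         {'S', 'T', 'N', 'Q'},                   # Polar uncharged
--         {'G', 'P', 'C'}                         # Special cases
--     ]
--     for group in conservative_groups:
--         if original in group and mutated in group:
--             return "Conservative"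
--     return "Non-Conservative"
-- ===== SOURCE B (Python) =====
-- _GROUP_OF = {}
-- for _i, _letters in enumerate(("AVLIM", "FYW", "DE", "KRH", "STNQ", "GPC")):
--     for _ch in _letters:
--         _GROUP_OF[_ch] = _i
--
-- def get_substitution_type(original, mutated):
--     g = _GROUP_OF.get(original)
--     if g is not None and g == _GROUP_OF.get(mutated):
--         return "Conservative"
--     return "Non-Conservative"
-- ===== Notes on version B (the rewrite author's own statement) =====
-- stated objective: idiomatic
-- what changed: Replaced the loop over six sets doing two membership scans per group with a residue->group-index dict built once at module load; the function body is two lookups and a guarded comparison, no loop.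
import Mathlib
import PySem

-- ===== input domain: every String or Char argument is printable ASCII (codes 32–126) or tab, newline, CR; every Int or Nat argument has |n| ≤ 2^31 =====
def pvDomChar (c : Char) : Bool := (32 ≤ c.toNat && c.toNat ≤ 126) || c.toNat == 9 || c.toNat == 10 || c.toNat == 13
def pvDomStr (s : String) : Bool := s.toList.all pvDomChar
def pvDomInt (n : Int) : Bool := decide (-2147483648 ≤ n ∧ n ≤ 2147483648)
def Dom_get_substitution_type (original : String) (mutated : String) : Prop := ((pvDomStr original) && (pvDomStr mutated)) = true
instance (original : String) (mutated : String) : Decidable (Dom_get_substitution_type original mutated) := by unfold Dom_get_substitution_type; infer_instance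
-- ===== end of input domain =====

-- B replaces A's loop over six sets by a residue->group-index dict built once, so the
-- function body is two lookups and a guarded comparison (objective: idiomatic).

-- ===== PORT A =====
-- the for-loop with early return, as structural recursion over the literal group list
def pvLoopA (original mutated : String) : List (PySem.Set String) → String
  | [] => "Non-Conservative"
  | g :: rest =>
      if PySem.Set.contains g original && PySem.Set.contains g mutated then "Conservative"
      else pvLoopA original mutated rest

def get_substitution_type (original : String) (mutated : String) : String :=
  pvLoopA original mutated
    [PySem.Set.ofList ["A", "V", "L", "I", "M"],
     PySem.Set.ofList ["F", "Y", "W"],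
     PySem.Set.ofList ["D", "E"],
     PySem.Set.ofList ["K", "R", "H"],
     PySem.Set.ofList ["S", "T", "N", "Q"],
     PySem.Set.ofList ["G", "P", "C"]]

-- ===== PORT B =====
-- the module-level dict build: for i, letters in enumerate(...): for ch in letters: d[ch] = i
def pvGroupOf : PySem.Dict String Int :=
  (PySem.List.enumerate ["AVLIM", "FYW", "DE", "KRH", "STNQ", "GPC"]).foldl
    (fun d p => p.2.toList.foldl (fun d c => d.insert (String.ofList [c]) p.1) d)
    PySem.Dict.empty

def get_substitution_type_alt (original : String) (mutated : String) : String :=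
  let g := pvGroupOf.get? original
  if g.isSome && (g == pvGroupOf.get? mutated) then "Conservative" else "Non-Conservative"

-- ===== PRECONDITION & SPEC =====
def Spec_get_substitution_type (original : String) (mutated : String) (out : String) : Prop := out = get_substitution_type_alt original mutated
instance (original : String) (mutated : String) (out : String) : Decidable (Spec_get_substitution_type original mutated out) := by unfold Spec_get_substitution_type; infer_instance

-- ===== CLAIM (what is proved, stated in full; the proofs are below) =====
def Claim_equal_get_substitution_type : Prop := ∀ (original : String) (mutated : String), Dom_get_substitution_type original mutated → Spec_get_substitution_type original mutated (get_substitution_type original mutated)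

-- ===== LEMMAS AND PROOFS =====
-- the 20 residue letters, in the order both programs list them
def pvLetters : List String :=
  ["A", "V", "L", "I", "M", "F", "Y", "W", "D", "E", "K", "R", "H", "S", "T", "N", "Q", "G", "P", "C"]

theorem pvKeys : pvGroupOf.keys = pvLetters := by decide

theorem pvGet?_none {s : String} (h : s ∉ pvLetters) : pvGroupOf.get? s = none := by
  rw [PySem.Dict.get?_eq_none_iff_not_mem_keys, pvKeys]; exact h

theorem pvA_left {o : String} (m : String) (h : o ∉ pvLetters) :
    get_substitution_type o m = "Non-Conservative" := by
  simp [pvLetters] at h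
  simp [get_substitution_type, pvLoopA, PySem.Set.contains, PySem.Set.ofList, PySem.Set.add, h]

theorem pvA_right (o : String) {m : String} (h : m ∉ pvLetters) :
    get_substitution_type o m = "Non-Conservative" := by
  simp [pvLetters] at h
  simp [get_substitution_type, pvLoopA, PySem.Set.contains, PySem.Set.ofList, PySem.Set.add, h]

theorem pvB_left {o : String} (m : String) (h : o ∉ pvLetters) :
    get_substitution_type_alt o m = "Non-Conservative" := by
  simp [get_substitution_type_alt, pvGet?_none h]

theorem pvB_right (o : String) {m : String} (h : m ∉ pvLetters) :
    get_substitution_type_alt o m = "Non-Conservative" := by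
  cases hg : pvGroupOf.get? o <;>
    simp [get_substitution_type_alt, hg, pvGet?_none h]

-- ===== VERDICT (by name: the statement is the Claim_ definition above) =====
theorem get_substitution_type_spec : Claim_equal_get_substitution_type := by
  intro o m _
  unfold Spec_get_substitution_type
  by_cases ho : o ∈ pvLetters
  · by_cases hm : m ∈ pvLetters
    · fin_cases ho <;> fin_cases hm <;> decide
    · rw [pvA_right o hm, pvB_right o hm]
  · rw [pvA_left m ho, pvB_left m ho]
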